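-- pv_equiv track=rewrite | github.com/MagonBorn/CodeChallenges | CodeWars/0014-HorseStamina.py | estimator
-- ===== SOURCE A (Python) =====
-- def estimator(obstacles, stamina):
--     # Can use Two pointers: When encountering a 1, move second pointer forward until it reaches 0
--     # move second pointer forward counting continuious occurances of 1, adjust by subtracing from
--     # stamina (occurances squared plus 1)
--
--     lp = 0
--     rp = 0
--     while lp < len(obstacles):
--         if obstacles[lp] == 1:
--             rp = lp
--             while rp <= len(obstacles)-1 and obstacles[rp] == 1:
--                 rp += 1
--             stamina -= (lp-rp) * (lp-rp) + 1
--             lp = rp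
--         lp += 1
--     return stamina >= 0
-- ===== SOURCE B (Python) =====
-- def estimator(obstacles, stamina):
--     # Element-wise incremental costing: a run of L ones costs L*L + 1, and
--     # L*L = 1 + 3 + 5 + ...  so the k-th consecutive 1 costs 2*k + 1
--     # (plus the run's extra +1 charged when the run starts). No run length
--     # is ever measured or squared, and we bail out as soon as stamina < 0.
--     run = 0
--     for x in obstacles:
--         if x == 1:
--             stamina -= 2 * run + 1 + (1 if run == 0 else 0)
--             if stamina < 0:
--                 return False
--             run += 1
--         else:
--             run = 0
--     return stamina >= 0
-- ===== Notes on version B (the rewrite author's own statement) =====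
-- stated objective: alternative
-- what changed: Replaces the two-pointer run detection (measure each run of 1s, subtract L*L+1) by an element-wise scan that never computes a run length: each k-th consecutive 1 is charged its incremental odd cost 2k+1 (plus 1 at a run start, since L*L+1 = 1 + sum of first L odd numbers), with an early False return the moment stamina goes negative.
import Mathlib
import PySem

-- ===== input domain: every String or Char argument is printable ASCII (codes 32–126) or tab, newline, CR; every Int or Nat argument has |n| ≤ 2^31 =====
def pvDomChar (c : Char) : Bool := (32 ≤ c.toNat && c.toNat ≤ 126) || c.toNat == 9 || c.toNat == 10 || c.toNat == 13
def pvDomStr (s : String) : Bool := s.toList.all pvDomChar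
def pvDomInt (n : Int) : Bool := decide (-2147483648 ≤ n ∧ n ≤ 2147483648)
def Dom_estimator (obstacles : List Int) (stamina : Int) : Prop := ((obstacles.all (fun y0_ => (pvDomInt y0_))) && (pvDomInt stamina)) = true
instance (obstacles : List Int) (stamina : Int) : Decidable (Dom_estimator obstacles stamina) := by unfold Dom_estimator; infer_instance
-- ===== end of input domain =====

-- B replaces A's two-pointer run measurement (L*L+1 per run of 1s) by an element-wise
-- scan charging each consecutive 1 its incremental odd cost 2k+1, with early exit (alternative).

-- ===== PORT A =====
-- inner while loop: 'while rp <= len(obstacles)-1 and obstacles[rp] == 1: rp += 1'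
def estInnerA (obstacles : List Int) (rp : Nat) : Nat :=
  if h : (rp : Int) ≤ (obstacles.length : Int) - 1 ∧
         PySem.List.pyGet? obstacles (rp : Int) = some 1 then
    estInnerA obstacles (rp + 1)
  else rp
termination_by obstacles.length - rp
decreasing_by omega

-- estInnerA only moves rp forward (used by estLoopA's termination proof)
theorem estInnerA_ge (obstacles : List Int) (rp : Nat) : rp ≤ estInnerA obstacles rp := by
  fun_induction estInnerA obstacles rp with
  | case1 rp h ih => omega
  | case2 rp h => omega

-- outer while loop over lp, carrying stamina
def estLoopA (obstacles : List Int) (lp : Nat) (stamina : Int) : Int :=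
  if h : lp < obstacles.length then
    if PySem.List.pyGet? obstacles (lp : Int) = some 1 then
      let rp := estInnerA obstacles lp
      estLoopA obstacles (rp + 1)
        (stamina - (((lp : Int) - (rp : Int)) * ((lp : Int) - (rp : Int)) + 1))
    else
      estLoopA obstacles (lp + 1) stamina
  else stamina
termination_by obstacles.length - lp
decreasing_by
  · have := estInnerA_ge obstacles lp
    omega
  · omega

def estimator (obstacles : List Int) (stamina : Int) : Bool :=
  estLoopA obstacles 0 stamina ≥ 0

-- ===== PORT B =====
-- Source B's for-loop: state = (run, stamina); early 'return False' when stamina < 0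
def loopB : List Int → Int → Int → Bool
  | [], _, stamina => stamina ≥ 0
  | x :: xs, run, stamina =>
    if x = 1 then
      let s := stamina - (2 * run + 1 + (if run = 0 then 1 else 0))
      if s < 0 then false else loopB xs (run + 1) s
    else loopB xs 0 stamina

def estimator_alt (obstacles : List Int) (stamina : Int) : Bool :=
  loopB obstacles 0 stamina

-- ===== PRECONDITION & SPEC =====
def Spec_estimator (obstacles : List Int) (stamina : Int) (out : Bool) : Prop := out = estimator_alt obstacles stamina
instance (obstacles : List Int) (stamina : Int) (out : Bool) : Decidable (Spec_estimator obstacles stamina out) := by unfold Spec_estimator; infer_instance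

-- ===== CLAIM (what is proved, stated in full; the proofs are below) =====
def Claim_equal_estimator : Prop := ∀ (obstacles : List Int) (stamina : Int), Dom_estimator obstacles stamina → Spec_estimator obstacles stamina (estimator obstacles stamina)

-- ===== LEMMAS AND PROOFS =====

-- the total cost B's loop will still charge from state `run`
def costB : List Int → Int → Int
  | [], _ => 0
  | x :: xs, run =>
    if x = 1 then (2 * run + 1 + (if run = 0 then 1 else 0)) + costB xs (run + 1)
    else costB xs 0

theorem costB_nonneg (xs : List Int) (run : Int) (h : 0 ≤ run) : 0 ≤ costB xs run := by
  induction xs generalizing run with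
  | nil => simp [costB]
  | cons x xs ih =>
    by_cases hx : x = 1
    · have h1 := ih (run + 1) (by omega)
      simp only [costB, if_pos hx]
      split_ifs <;> omega
    · simpa [costB, hx] using ih 0 le_rfl

-- B's loop decides whether stamina covers the remaining cost
theorem loopB_eq (xs : List Int) (run stamina : Int) (h : 0 ≤ run) :
    loopB xs run stamina = decide (stamina - costB xs run ≥ 0) := by
  induction xs generalizing run stamina with
  | nil => simp [loopB, costB]
  | cons x xs ih =>
    by_cases hx : x = 1
    · simp only [loopB, costB, if_pos hx]
      set c : Int := 2 * run + 1 + (if run = 0 then 1 else 0) with hc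
      have hnn := costB_nonneg xs (run + 1) (by omega)
      by_cases hs : stamina - c < 0
      · simp only [if_pos hs]
        symm
        rw [decide_eq_false_iff_not]
        omega
      · rw [if_neg hs, ih _ _ (by omega), sub_sub]
    · simp only [loopB, costB, if_neg hx]
      exact ih 0 stamina le_rfl

-- peeling a maximal run of 1s from costB at a positive run counter
theorem costB_pos (xs : List Int) (run : Int) (h : 1 ≤ run) :
    costB xs run = (run + ((xs.takeWhile (· == (1:Int))).length : Int)) ^ 2 - run ^ 2
      + costB (xs.dropWhile (· == (1:Int))) 0 := by
  induction xs generalizing run with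
  | nil => simp [costB]
  | cons x xs ih =>
    by_cases hx : x = 1
    · subst hx
      rw [costB, List.takeWhile_cons, List.dropWhile_cons]
      simp only [BEq.rfl, if_true]
      rw [ih (run + 1) (by omega)]
      have hrz : ¬ run = 0 := by omega
      simp [hrz]
      ring
    · have hb : ¬ ((x == (1:Int)) = true) := by simpa using hx
      rw [List.takeWhile_cons, List.dropWhile_cons]
      simp only [if_neg hb, costB, if_neg hx, List.length_nil]
      push_cast
      ring

theorem dropWhile_eq_drop (p : Int → Bool) (l : List Int) :
    l.dropWhile p = l.drop (l.takeWhile p).length := by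
  induction l with
  | nil => simp
  | cons x xs ih =>
    by_cases h : p x <;> simp [h, ih]

-- characterisation of the inner while loop: it skips the maximal run of 1s
theorem estInnerA_eq (obstacles : List Int) (rp : Nat) :
    estInnerA obstacles rp = rp + ((obstacles.drop rp).takeWhile (· == (1:Int))).length := by
  fun_induction estInnerA obstacles rp with
  | case1 rp h ih =>
    obtain ⟨h1, h2⟩ := h
    have hlt : rp < obstacles.length := by omega
    have hget : obstacles[rp] = 1 := by
      rw [PySem.List.pyGet?_natCast, List.getElem?_eq_getElem hlt] at h2
      exact Option.some.inj h2
    rw [ih, List.drop_eq_getElem_cons hlt, hget, List.takeWhile_cons]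
    simp; omega
  | case2 rp h =>
    by_cases hlt : rp < obstacles.length
    · have h2 : ¬ PySem.List.pyGet? obstacles (rp : Int) = some 1 := by
        intro hc; exact h ⟨by omega, hc⟩
      have hget : obstacles[rp] ≠ 1 := by
        rw [PySem.List.pyGet?_natCast, List.getElem?_eq_getElem hlt] at h2
        intro hc; exact h2 (by rw [hc])
      rw [List.drop_eq_getElem_cons hlt, List.takeWhile_cons]
      simp [hget]
    · rw [List.drop_eq_nil_of_le (by omega)]; simp

-- when the inner loop stops, its guard is false
theorem estInnerA_stop (obstacles : List Int) (rp : Nat) :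
    ¬ (((estInnerA obstacles rp : Nat) : Int) ≤ (obstacles.length : Int) - 1 ∧
       PySem.List.pyGet? obstacles ((estInnerA obstacles rp : Nat) : Int) = some 1) := by
  fun_induction estInnerA obstacles rp with
  | case1 rp h ih => exact ih
  | case2 rp h => exact h

-- a head that is not 1 contributes nothing to costB at run 0
theorem costB_cons_ne (x : Int) (hx : x ≠ 1) (xs : List Int) :
    costB (x :: xs) 0 = costB xs 0 := by
  simp [costB, hx]

-- the outer loop computed on a suffix equals stamina minus costB of that suffix
theorem estLoopA_eq (obstacles : List Int) (lp : Nat) (stamina : Int) :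
    estLoopA obstacles lp stamina = stamina - costB (obstacles.drop lp) 0 := by
  fun_induction estLoopA obstacles lp stamina with
  | case1 lp stamina h h1 rp' ih =>
    have hget : obstacles[lp] = 1 := by
      rw [PySem.List.pyGet?_natCast, List.getElem?_eq_getElem h] at h1
      exact Option.some.inj h1
    have hdrop : obstacles.drop lp = 1 :: obstacles.drop (lp + 1) := by
      rw [List.drop_eq_getElem_cons h, hget]
    set L := ((obstacles.drop (lp + 1)).takeWhile (· == (1:Int))).length with hL
    have hr : estInnerA obstacles lp = lp + 1 + L := by
      rw [estInnerA_eq, hdrop, List.takeWhile_cons]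
      simp; omega
    have hdw : (obstacles.drop (lp + 1)).dropWhile (· == (1:Int))
        = obstacles.drop (estInnerA obstacles lp) := by
      rw [dropWhile_eq_drop, List.drop_drop, hr, ← hL]
    have htot : costB (obstacles.drop lp) 0
        = ((L : Int) + 1) * ((L : Int) + 1) + 1 + costB (obstacles.drop (estInnerA obstacles lp)) 0 := by
      have hc : costB (1 :: obstacles.drop (lp + 1)) 0 = 2 + costB (obstacles.drop (lp + 1)) 1 := by
        simp [costB]
      rw [hdrop, hc, costB_pos _ 1 le_rfl, ← hL, hdw]
      ring
    have hnext : costB (obstacles.drop (estInnerA obstacles lp)) 0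
        = costB (obstacles.drop (estInnerA obstacles lp + 1)) 0 := by
      have hstop := estInnerA_stop obstacles lp
      by_cases hlt : estInnerA obstacles lp < obstacles.length
      · have h2 : ¬ PySem.List.pyGet? obstacles ((estInnerA obstacles lp : Nat) : Int) = some 1 := by
          intro hc; exact hstop ⟨by omega, hc⟩
        have hne : obstacles[estInnerA obstacles lp] ≠ 1 := by
          rw [PySem.List.pyGet?_natCast, List.getElem?_eq_getElem hlt] at h2
          intro hc; exact h2 (by rw [hc])
        rw [List.drop_eq_getElem_cons hlt, costB_cons_ne _ hne]
      · rw [List.drop_eq_nil_of_le (by omega), List.drop_eq_nil_of_le (by omega)]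
    have hrp : rp' = lp + 1 + L := hr
    rw [ih, hnext.symm, htot, hr, hrp]
    push_cast
    ring
  | case2 lp stamina h h1 ih =>
    have hne : obstacles[lp] ≠ 1 := by
      rw [PySem.List.pyGet?_natCast, List.getElem?_eq_getElem h] at h1
      intro hc; exact h1 (by rw [hc])
    rw [ih, List.drop_eq_getElem_cons h, costB_cons_ne _ hne]
  | case3 lp stamina h =>
    rw [List.drop_eq_nil_of_le (by omega)]
    simp [costB]

-- ===== VERDICT (by name: the statement is the Claim_ definition above) =====
theorem estimator_spec : Claim_equal_estimator := by
  intro obstacles stamina _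
  unfold Spec_estimator estimator estimator_alt
  rw [estLoopA_eq, loopB_eq _ _ _ le_rfl]
  simp
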